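-- pv_equiv track=rewrite | github.com/Jskenpo/LABE_COMPILADORES | TablaSLR.py | first_of_production
-- ===== SOURCE A (Python) =====
-- def first_of_production(first, production, terminals):
--     result = set()
--     for symbol in production:
--         if symbol in terminals:
--             result.add(symbol)
--             break
--         else:
--             result.update(first[symbol])
--             if '#' not in first[symbol]:
--                 break
--     else:
--         result.add('#')
--     return result
-- ===== SOURCE B (Python) =====
-- def first_of_production(first, production, terminals):
--     if not production:
--         return {'#'}
--     head = production[0]
--     if head in terminals:
--         return {head}
--     f = first[head]
--     if '#' in f:
--         return set(f) | first_of_production(first, production[1:], terminals)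
--     return set(f)
-- ===== Notes on version B (the rewrite author's own statement) =====
-- stated objective: alternative
-- what changed: Replaced the imperative loop with a break/else and a mutating accumulator set by the classic recursive FIRST recurrence over the production (base case {'#'}, head terminal {head}, otherwise first[head] unioned with the FIRST of the tail when nullable), building fresh sets.
import Mathlib
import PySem

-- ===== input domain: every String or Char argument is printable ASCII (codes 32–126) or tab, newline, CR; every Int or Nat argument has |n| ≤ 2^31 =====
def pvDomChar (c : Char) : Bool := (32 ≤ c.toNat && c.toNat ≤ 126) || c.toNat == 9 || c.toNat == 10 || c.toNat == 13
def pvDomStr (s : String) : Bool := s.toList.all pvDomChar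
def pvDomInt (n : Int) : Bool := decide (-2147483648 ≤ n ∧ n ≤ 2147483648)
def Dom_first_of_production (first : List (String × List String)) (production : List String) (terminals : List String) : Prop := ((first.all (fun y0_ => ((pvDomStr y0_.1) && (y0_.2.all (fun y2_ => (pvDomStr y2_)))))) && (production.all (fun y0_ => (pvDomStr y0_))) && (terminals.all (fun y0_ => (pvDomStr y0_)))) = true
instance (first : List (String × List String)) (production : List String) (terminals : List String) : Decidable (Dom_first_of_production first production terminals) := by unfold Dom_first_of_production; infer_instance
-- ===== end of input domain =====

-- B replaces A's break/else loop over a mutating accumulator set with the classic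
-- recursive FIRST recurrence over the production, building fresh sets (objective: alternative).


-- ===== PORT A =====
-- the for/break/else loop of A; 'first[symbol]' is exact under Pre_ (the key is present
-- at every lookup the loop performs); getD [] is only reached outside Pre_
def first_of_production_loopA (first : List (String × List String)) (terminals : List String) (result : PySem.Set String) : List String → PySem.Set String
  | [] => PySem.Set.add result "#"
  | symbol :: rest =>
    if terminals.contains symbol then
      PySem.Set.add result symbol
    else
      let f := PySem.Dict.getD (PySem.Dict.mk first) symbol []
      let result := PySem.Set.update result f
      if f.contains "#" then
        first_of_production_loopA first terminals result rest
      else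
        result

def first_of_production (first : List (String × List String)) (production : List String) (terminals : List String) : List String :=
  first_of_production_loopA first terminals PySem.Set.empty production

-- ===== PORT B =====
def first_of_production_alt (first : List (String × List String)) (production : List String) (terminals : List String) : List String :=
  match production with
  | [] => PySem.Set.ofList ["#"]
  | head :: rest =>
    if terminals.contains head then
      PySem.Set.ofList [head]
    else
      let f := PySem.Dict.getD (PySem.Dict.mk first) head []
      if f.contains "#" then
        PySem.Set.union (PySem.Set.ofList f) (first_of_production_alt first rest terminals)
      else
        PySem.Set.ofList f

-- ===== PRECONDITION & SPEC =====
-- Pre_ excludes exactly the inputs where Python A raises KeyError: the first symbol of the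
-- production that is a terminal or not a nullable known nonterminal (a key of first whose
-- entry contains '#') must, if it exists, be a terminal or a key of first.
def Pre_first_of_production (first : List (String × List String)) (production : List String) (terminals : List String) : Prop :=
  production.findIdx (fun s => terminals.contains s || !(PySem.Dict.contains (PySem.Dict.mk first) s && (PySem.Dict.getD (PySem.Dict.mk first) s []).contains "#")) < production.length →
    (terminals.contains (production.getD (production.findIdx (fun s => terminals.contains s || !(PySem.Dict.contains (PySem.Dict.mk first) s && (PySem.Dict.getD (PySem.Dict.mk first) s []).contains "#"))) "") = true ∨
     PySem.Dict.contains (PySem.Dict.mk first) (production.getD (production.findIdx (fun s => terminals.contains s || !(PySem.Dict.contains (PySem.Dict.mk first) s && (PySem.Dict.getD (PySem.Dict.mk first) s []).contains "#"))) "") = true)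
instance (first : List (String × List String)) (production : List String) (terminals : List String) : Decidable (Pre_first_of_production first production terminals) := by unfold Pre_first_of_production; infer_instance

def pvWitness_first_of_production : (List (String × List String)) × List String × List String :=
  ([("S", ["a", "#"])], ["S", "b"], ["b"])

def Spec_first_of_production (first : List (String × List String)) (production : List String) (terminals : List String) (out : List String) : Prop := out = first_of_production_alt first production terminals
instance (first : List (String × List String)) (production : List String) (terminals : List String) (out : List String) : Decidable (Spec_first_of_production first production terminals out) := by unfold Spec_first_of_production; infer_instance

-- ===== CLAIM (what is proved, stated in full; the proofs are below) =====
def Claim_equal_first_of_production : Prop := ∀ (first : List (String × List String)) (production : List String) (terminals : List String), Dom_first_of_production first production terminals → Pre_first_of_production first production terminals → Spec_first_of_production first production terminals (first_of_production first production terminals)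

-- ===== LEMMAS AND PROOFS =====

-- folding add over the deduplicated list is folding add over the list itself
theorem update_ofList_eq_update (s : PySem.Set String) (xs : List String) :
    PySem.Set.update s (PySem.Set.ofList xs) = PySem.Set.update s xs := by
  rw [PySem.Set.update_eq_append_filter, PySem.Set.update_eq_append_filter, PySem.Set.ofList_ofList]

-- updating with an already-updated set adds the same new elements
theorem update_update (acc s : PySem.Set String) (t : List String) :
    PySem.Set.update acc (PySem.Set.update s t) = PySem.Set.update (PySem.Set.update acc s) t := by
  rw [PySem.Set.update_eq_append_filter s t, PySem.Set.update_append,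
    PySem.Set.update_eq_append_filter (PySem.Set.update acc s)
      (List.filter (fun y => !s.contains y) (PySem.Set.ofList t)),
    PySem.Set.update_eq_append_filter (PySem.Set.update acc s) t]
  congr 1
  rw [PySem.Set.ofList_eq_self_of_nodup _ ((PySem.Set.nodup_ofList t).filter _), List.filter_filter]
  apply List.filter_congr
  intro x hx
  by_cases hxP : x ∈ PySem.Set.update acc s
  · simp [hxP]
  · have hxs : x ∉ s := fun h => hxP ((PySem.Set.mem_update acc s x).mpr (Or.inr h))
    simp [hxP, hxs]

-- the set B returns carries no duplicates
theorem alt_nodup (first : List (String × List String)) (terminals : List String) :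
    ∀ production : List String, (first_of_production_alt first production terminals).Nodup := by
  intro production
  induction production with
  | nil => exact PySem.Set.nodup_ofList _
  | cons head rest ih =>
      rw [first_of_production_alt]
      split
      · exact PySem.Set.nodup_ofList _
      · show (if (PySem.Dict.getD (PySem.Dict.mk first) head []).contains "#" = true then
            PySem.Set.union (PySem.Set.ofList (PySem.Dict.getD (PySem.Dict.mk first) head []))
              (first_of_production_alt first rest terminals)
          else PySem.Set.ofList (PySem.Dict.getD (PySem.Dict.mk first) head [])).Nodup
        split
        · exact PySem.Set.nodup_union _ _ (PySem.Set.nodup_ofList _)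
        · exact PySem.Set.nodup_ofList _

-- A's loop starting from any accumulator equals the accumulator updated with B's fresh set
theorem loopA_eq_update_alt (first : List (String × List String)) (terminals : List String) :
    ∀ (production : List String) (acc : PySem.Set String),
      first_of_production_loopA first terminals acc production =
        PySem.Set.update acc (first_of_production_alt first production terminals) := by
  intro production
  induction production with
  | nil => intro acc; rfl
  | cons symbol rest ih =>
      intro acc
      rw [first_of_production_loopA, first_of_production_alt]
      by_cases ht : terminals.contains symbol = true
      · rw [if_pos ht, if_pos ht]; rfl
      · rw [if_neg ht, if_neg ht]
        by_cases hh : (PySem.Dict.getD (PySem.Dict.mk first) symbol []).contains "#" = true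
        · rw [if_pos hh, if_pos hh, ih, PySem.Set.union, update_update,
            update_ofList_eq_update]
        · rw [if_neg hh, if_neg hh]
          exact (update_ofList_eq_update acc _).symm

-- ===== VERDICT (by name: the statement is the Claim_ definition above) =====
theorem first_of_production_spec : Claim_equal_first_of_production := by
  intro first production terminals _ _
  show first_of_production first production terminals = first_of_production_alt first production terminals
  rw [first_of_production, loopA_eq_update_alt,
    show PySem.Set.empty = ([] : PySem.Set String) from rfl, PySem.Set.update_nil_left]
  exact PySem.Set.ofList_eq_self_of_nodup _ (alt_nodup first terminals production)
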